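-- pv_equiv track=rewrite | github.com/12asascoder/atmos1.0 | backend/playwright/run.py | extract_call_to_action
-- ===== SOURCE A (Python) =====
-- from typing import List, Dict, Any
--
-- def extract_call_to_action(lines: List[str]) -> str:
--     """Try to extract call to action"""
--
--     cta_keywords = ['shop now', 'buy now', 'learn more', 'sign up',
--                    'download', 'get started', 'pre-order', 'order now']
--
--     for line in lines:
--         line_lower = line.lower()
--         for keyword in cta_keywords:
--             if keyword in line_lower:
--                 return line
--
--     return "View Details"  # Default
-- ===== SOURCE B (Python) =====
-- def extract_call_to_action(lines):
--     """Try to extract call to action"""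
--     cta_keywords = ['shop now', 'buy now', 'learn more', 'sign up',
--                     'download', 'get started', 'pre-order', 'order now']
--     lowered = [line.lower() for line in lines]
--     best = len(lines)
--     for keyword in cta_keywords:
--         for i in range(best):
--             if keyword in lowered[i]:
--                 best = i
--                 break
--     return lines[best] if best < len(lines) else "View Details"
-- ===== Notes on version B (the rewrite author's own statement) =====
-- stated objective: alternative
-- what changed: Inverts the loop nesting: instead of scanning keywords inside a line-major early-return loop, B lowercases all lines once, then iterates keyword-major, maintaining the minimal matching line index with a shrinking search bound, and indexes the line list once at the end.
import Mathlib
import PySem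

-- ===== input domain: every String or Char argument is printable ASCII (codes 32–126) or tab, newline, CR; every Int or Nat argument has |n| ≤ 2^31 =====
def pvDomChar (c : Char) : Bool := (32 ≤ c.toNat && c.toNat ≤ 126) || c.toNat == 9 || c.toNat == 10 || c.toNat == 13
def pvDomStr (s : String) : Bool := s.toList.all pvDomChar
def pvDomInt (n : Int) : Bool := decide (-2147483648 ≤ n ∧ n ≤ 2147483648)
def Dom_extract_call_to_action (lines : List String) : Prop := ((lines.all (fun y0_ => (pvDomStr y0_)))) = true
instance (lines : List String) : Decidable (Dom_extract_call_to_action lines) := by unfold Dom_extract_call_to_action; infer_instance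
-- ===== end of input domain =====

-- B inverts A's loop nesting: it lowercases all lines once, then scans keyword-major,
-- shrinking a best-match index bound, and indexes the line list once (alternative; same value).

-- ===== PORT A =====
def ctaKeywordsA : List String :=
  ["shop now", "buy now", "learn more", "sign up",
   "download", "get started", "pre-order", "order now"]

-- inner 'for keyword in cta_keywords: if keyword in line_lower: return line'
def ctaInnerA (kws : List String) (line_lower line : String) : Option String :=
  match kws with
  | [] => none
  | k :: t => if PySem.Str.isIn k line_lower then some line else ctaInnerA t line_lower line

def extract_call_to_action (lines : List String) : String :=
  match lines with
  | [] => "View Details"  -- Default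
  | line :: rest =>
    let line_lower := PySem.Str.lower line
    match ctaInnerA ctaKeywordsA line_lower line with
    | some r => r
    | none => extract_call_to_action rest

-- ===== PORT B =====
def ctaKeywordsB : List String :=
  ["shop now", "buy now", "learn more", "sign up",
   "download", "get started", "pre-order", "order now"]

-- inner 'for i in range(best): if keyword in lowered[i]: best = i; break'
-- (i counts up through ls; stops at the bound, exactly like range(best))
def ctaScanB (k : String) (ls : List String) (i bound : Nat) : Nat :=
  match ls with
  | [] => bound
  | l :: t =>
    if bound ≤ i then bound
    else if PySem.Str.isIn k l then i
    else ctaScanB k t (i + 1) bound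

def extract_call_to_action_alt (lines : List String) : String :=
  let lowered := lines.map PySem.Str.lower
  let best := ctaKeywordsB.foldl (fun b k => ctaScanB k lowered 0 b) lines.length
  -- 'lines[best] if best < len(lines) else "View Details"'; best < len so getD is exact indexing
  if best < lines.length then lines.getD best "View Details" else "View Details"

-- ===== PRECONDITION & SPEC =====
def Spec_extract_call_to_action (lines : List String) (out : String) : Prop := out = extract_call_to_action_alt lines
instance (lines : List String) (out : String) : Decidable (Spec_extract_call_to_action lines out) := by unfold Spec_extract_call_to_action; infer_instance

-- ===== CLAIM (what is proved, stated in full; the proofs are below) =====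
def Claim_equal_extract_call_to_action : Prop := ∀ (lines : List String), Dom_extract_call_to_action lines → Spec_extract_call_to_action lines (extract_call_to_action lines)

-- ===== LEMMAS AND PROOFS =====

-- A's inner loop returns the line iff some keyword matches
theorem ctaInnerA_eq (kws : List String) (ll l : String) :
    ctaInnerA kws ll l = if kws.any (fun k => PySem.Str.isIn k ll) then some l else none := by
  induction kws with
  | nil => simp [ctaInnerA]
  | cons k t ih =>
    rw [ctaInnerA, ih, List.any_cons]
    cases h : PySem.Str.isIn k ll
    · simp only [Bool.false_or, Bool.false_eq_true, if_false]
    · simp only [Bool.true_or, if_true]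

-- A returns the line at the first matching index (getD gives the default when none matches)
theorem extractA_getD (lines : List String) :
    extract_call_to_action lines =
      lines.getD (lines.findIdx (fun l => ctaKeywordsA.any (fun k => PySem.Str.isIn k (PySem.Str.lower l)))) "View Details" := by
  induction lines with
  | nil => rfl
  | cons l rest ih =>
    rw [extract_call_to_action, ctaInnerA_eq, List.findIdx_cons]
    cases h : ctaKeywordsA.any (fun k => PySem.Str.isIn k (PySem.Str.lower l))
    · simpa using ih
    · simp

-- B's inner scan computes min(bound, i + first matching index), given bound ≤ i + length
theorem ctaScanB_eq (k : String) (ls : List String) (i b : Nat) (h : b ≤ i + ls.length) :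
    ctaScanB k ls i b = min b (i + ls.findIdx (fun l => PySem.Str.isIn k l)) := by
  induction ls generalizing i b with
  | nil => simp [ctaScanB] at h ⊢; omega
  | cons l t ih =>
    rw [ctaScanB, List.findIdx_cons]
    by_cases hb : b ≤ i
    · have : i ≤ i + (cond (PySem.Str.isIn k l) 0 (t.findIdx (fun l => PySem.Str.isIn k l) + 1)) := Nat.le_add_right _ _
      simp only [hb, if_true]; omega
    · simp only [hb, if_false]
      cases hm : PySem.Str.isIn k l
      · simp only [Bool.false_eq_true, if_false, cond_false]
        rw [ih (i + 1) b (by simp at h ⊢; omega)]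
        omega
      · simp only [if_true, cond_true]
        omega

-- the fold over keywords, rewritten to min/findIdx (the bound stays ≤ length)
theorem ctaFold_eq (L : List String) (ks : List String) (b : Nat) (hb : b ≤ L.length) :
    ks.foldl (fun b k => ctaScanB k L 0 b) b
      = ks.foldl (fun b k => min b (L.findIdx (fun l => PySem.Str.isIn k l))) b := by
  induction ks generalizing b with
  | nil => rfl
  | cons k t ih =>
    simp only [List.foldl_cons]
    rw [ctaScanB_eq k L 0 b (by omega), Nat.zero_add]
    exact ih _ (le_trans (Nat.min_le_left _ _) hb)

theorem foldMin_le_init (ks : List String) (f : String → Nat) (b : Nat) :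
    ks.foldl (fun b k => min b (f k)) b ≤ b := by
  induction ks generalizing b with
  | nil => exact le_rfl
  | cons k t ih => exact le_trans (ih _) (Nat.min_le_left _ _)

theorem foldMin_le_mem (ks : List String) (f : String → Nat) :
    ∀ (b : Nat) (k : String), k ∈ ks → ks.foldl (fun b k => min b (f k)) b ≤ f k := by
  induction ks with
  | nil => intro b k hk; cases hk
  | cons a t ih =>
    intro b k hk
    rcases List.mem_cons.mp hk with h | h
    · subst h
      exact le_trans (foldMin_le_init t f _) (Nat.min_le_right _ _)
    · exact ih _ k h

theorem foldMin_succ (ks : List String) (f : String → Nat) (b : Nat) :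
    ks.foldl (fun b k => min b (f k + 1)) (b + 1)
      = ks.foldl (fun b k => min b (f k)) b + 1 := by
  induction ks generalizing b with
  | nil => rfl
  | cons k t ih =>
    simp only [List.foldl_cons]
    rw [Nat.succ_min_succ, ih]

-- min over keywords of each keyword's first index = first index matching any keyword
theorem foldMin_findIdx (ls ks : List String) :
    ks.foldl (fun b k => min b (ls.findIdx (fun l => PySem.Str.isIn k l))) ls.length
      = ls.findIdx (fun l => ks.any (fun k => PySem.Str.isIn k l)) := by
  induction ls with
  | nil =>
    simp only [List.findIdx_nil, List.length_nil]
    exact Nat.le_zero.mp (by simpa using foldMin_le_init ks (fun k => List.findIdx (fun l => PySem.Str.isIn k l) []) 0)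
  | cons x t ih =>
    rw [List.findIdx_cons]
    cases hq : ks.any (fun k => PySem.Str.isIn k x)
    · -- no keyword matches x: every per-keyword index is (index in t) + 1
      have hall : ∀ k ∈ ks, PySem.Str.isIn k x = false := by
        intro k hk
        cases hkk : PySem.Str.isIn k x
        · rfl
        · exact absurd (List.any_eq_true.mpr ⟨k, hk, hkk⟩) (by rw [hq]; exact Bool.false_ne_true)
      have hcongr : ks.foldl (fun b k => min b ((x :: t).findIdx (fun l => PySem.Str.isIn k l))) (x :: t).length
          = ks.foldl (fun b k => min b (t.findIdx (fun l => PySem.Str.isIn k l) + 1)) (t.length + 1) := by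
        rw [List.length_cons]
        apply List.foldl_ext
        intro b k hk
        rw [List.findIdx_cons, hall k hk]
        rfl
      rw [hcongr, foldMin_succ, ih]
      simp
    · -- some keyword matches x: the minimum is 0
      obtain ⟨k, hk, hkx⟩ := List.any_eq_true.mp hq
      have h0 : (x :: t).findIdx (fun l => PySem.Str.isIn k l) = 0 := by
        simp only [List.findIdx_cons]
        rw [hkx]
        rfl
      have h2 := foldMin_le_mem ks (fun K => (x :: t).findIdx (fun l => PySem.Str.isIn K l)) (x :: t).length k hk
      simp only [h0, Nat.le_zero] at h2
      simpa using h2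

theorem extract_eq_alt (lines : List String) :
    extract_call_to_action lines = extract_call_to_action_alt lines := by
  rw [extractA_getD]
  simp only [extract_call_to_action_alt]
  have hlen : (lines.map PySem.Str.lower).length = lines.length := by simp
  rw [ctaFold_eq _ _ _ (by rw [hlen]),
      show ctaKeywordsB = ctaKeywordsA from rfl]
  rw [← hlen, foldMin_findIdx, List.findIdx_map]
  simp only [Function.comp_def]
  rw [hlen]
  set J := lines.findIdx (fun l => ctaKeywordsA.any (fun k => PySem.Str.isIn k (PySem.Str.lower l))) with hJdef
  by_cases h : J < lines.length
  · simp [h]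
  · have : lines.length ≤ J := Nat.le_of_not_lt h
    simp [h]

-- ===== VERDICT (by name: the statement is the Claim_ definition above) =====
theorem extract_call_to_action_spec : Claim_equal_extract_call_to_action := by
  intro lines _
  unfold Spec_extract_call_to_action
  exact extract_eq_alt lines
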